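-- pv_equiv track=rewrite | github.com/RyanAquino/azure-scraper | src2/action_utils.py | add_line_break
-- ===== SOURCE A (Python) =====
-- def add_line_break(word, max_length):
--     if len(word) > max_length:
--         return (
--             word[:max_length]
--             + "\\\n           "
--             + add_line_break(word[max_length:], max_length)
--         )
--     else:
--         return word
-- ===== SOURCE B (Python) =====
-- def add_line_break(word, max_length):
--     return "\\\n           ".join(
--         word[i:i + max_length] for i in range(0, len(word), max_length)
--     )
-- ===== Notes on version B (the rewrite author's own statement) =====
-- stated objective: idiomatic
-- what changed: Replaced the suffix recursion (which concatenates the separator at every level) by a single range-stepped chunk comprehension joined once with the same separator.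
-- outside the precondition, e.g. on add_line_break('', 0): A returns '', B raises ValueError
import Mathlib
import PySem

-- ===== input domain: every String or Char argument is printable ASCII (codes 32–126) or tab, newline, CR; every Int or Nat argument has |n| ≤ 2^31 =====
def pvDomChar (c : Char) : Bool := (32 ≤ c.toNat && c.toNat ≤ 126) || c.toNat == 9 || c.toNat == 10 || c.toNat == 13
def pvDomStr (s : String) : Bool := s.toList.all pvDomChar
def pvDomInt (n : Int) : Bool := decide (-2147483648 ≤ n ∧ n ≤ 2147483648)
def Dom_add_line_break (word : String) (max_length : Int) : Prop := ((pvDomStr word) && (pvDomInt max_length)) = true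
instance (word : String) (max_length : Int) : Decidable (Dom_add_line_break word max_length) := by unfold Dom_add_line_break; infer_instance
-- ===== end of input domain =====

-- B replaces A's suffix recursion (separator concatenated at each recursion level) by a
-- range-stepped chunk comprehension joined once with the same separator (objective: idiomatic).

-- the separator literal "\\\n           " (backslash, newline, 11 spaces)
def sepALB : List Char := "\\\n           ".toList

-- ===== PORT A =====
-- A recurses on the suffix word[max_length:]; fuel = word length bounds the depth
-- (for max_length ≥ 1 the suffix strictly shrinks, so the fuel is never exhausted
-- before the base case; at fuel 0 the list is empty and both branches agree).
def goA : Nat → List Char → Int → List Char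
  | 0, cs, _ => cs
  | f + 1, cs, m =>
    if m < (cs.length : Int) then
      PySem.List.slice cs none (some m) ++ sepALB ++ goA f (PySem.List.slice cs (some m) none) m
    else cs

def add_line_break (word : String) (max_length : Int) : String :=
  String.ofList (goA word.toList.length word.toList max_length)

-- ===== PORT B =====
-- B: chunks word[i:i+max_length] for i in range(0, len(word), max_length), joined once.
def add_line_break_alt (word : String) (max_length : Int) : String :=
  String.ofList (PySem.Chars.join sepALB
    ((PySem.List.pyRange 0 (PySem.Chars.len word.toList) max_length).map
      (fun i => PySem.List.slice word.toList (some i) (some (i + max_length)))))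

-- ===== PRECONDITION & SPEC =====
-- Pre_ excludes max_length ≤ 0: there Python A raises RecursionError on every nonempty
-- word, and on the single returning input ("", 0) B's range(0, 0, 0) raises ValueError.
def Pre_add_line_break (_word : String) (max_length : Int) : Prop := 0 < max_length
instance (word : String) (max_length : Int) : Decidable (Pre_add_line_break word max_length) := by
  unfold Pre_add_line_break; infer_instance

def pvWitness_add_line_break : String × Int := ("hello world", 3)

def Spec_add_line_break (word : String) (max_length : Int) (out : String) : Prop := out = add_line_break_alt word max_length
instance (word : String) (max_length : Int) (out : String) : Decidable (Spec_add_line_break word max_length out) := by unfold Spec_add_line_break; infer_instance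

-- ===== CLAIM =====
def Claim_equal_add_line_break : Prop := ∀ (word : String) (max_length : Int), Dom_add_line_break word max_length → Pre_add_line_break word max_length → Spec_add_line_break word max_length (add_line_break word max_length)

-- ===== LEMMAS AND PROOFS =====

theorem pyRange_pos_cons (a b s : Int) (hs : 0 < s) (hab : a < b) :
    PySem.List.pyRange a b s = a :: PySem.List.pyRange (a + s) b s := by
  rw [PySem.List.pyRange_of_pos _ _ hs, PySem.List.pyRange_of_pos _ _ hs]
  have h1 : (b - a + s - 1) / s = (b - a - 1) / s + 1 := by
    have : b - a + s - 1 = (b - a - 1) + 1 * s := by ring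
    rw [this, Int.add_mul_ediv_right _ _ (by omega)]
  have hnn : 0 ≤ (b - a - 1) / s := Int.ediv_nonneg (by omega) (by omega)
  have h2 : (if a + s < b then ((b - (a + s) + s - 1) / s).toNat else 0) = ((b - a - 1) / s).toNat := by
    split
    · congr 1; ring_nf
    · have hle : b ≤ a + s := by omega
      have : (b - a - 1) / s = 0 := by
        apply Int.ediv_eq_zero_of_lt (by omega) (by omega)
      omega
  rw [h2, if_pos hab, h1]
  have h3 : ((b - a - 1) / s + 1).toNat = ((b - a - 1) / s).toNat + 1 := by omega
  rw [h3, List.range_succ_eq_map]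
  simp [List.map_map, Function.comp]
  intro k _; ring

theorem pyRange_pos_shift (b s c : Int) (hs : 0 < s) :
    PySem.List.pyRange c (b + c) s = (PySem.List.pyRange 0 b s).map (· + c) := by
  rw [PySem.List.pyRange_of_pos _ _ hs, PySem.List.pyRange_of_pos _ _ hs]
  have h : (b + c - c + s - 1) = (b - 0 + s - 1) := by ring
  have h2 : (c < b + c) ↔ (0 < b) := by omega
  rw [h]
  simp only [h2, List.map_map]
  apply List.map_congr_left; intro k _; simp [Function.comp]; ring

theorem join_cons_ne (sep p : List Char) (l : List (List Char)) (h : l ≠ []) :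
    PySem.Chars.join sep (p :: l) = p ++ sep ++ PySem.Chars.join sep l := by
  cases l with
  | nil => exact absurd rfl h
  | cons q rest => exact PySem.Chars.join_cons_cons sep p q rest

theorem goA_eq_chunks (m : Int) (hm : 0 < m) : ∀ (f : Nat) (cs : List Char), cs.length ≤ f →
    goA f cs m = PySem.Chars.join sepALB
      ((PySem.List.pyRange 0 (cs.length : Int) m).map
        (fun i => PySem.List.slice cs (some i) (some (i + m)))) := by
  intro f
  induction f with
  | zero =>
    intro cs hlen
    have : cs = [] := by simpa using List.length_eq_zero_iff.mp (Nat.le_zero.mp hlen)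
    subst this
    simp [goA, PySem.List.pyRange_of_pos _ _ hm, PySem.Chars.join, List.intercalate]
  | succ f ih =>
    intro cs hlen
    by_cases hlt : m < (cs.length : Int)
    · rw [show goA (f+1) cs m = PySem.List.slice cs none (some m) ++ sepALB ++ goA f (PySem.List.slice cs (some m) none) m from by rw [goA]; rw [if_pos hlt]]
      set cs' := PySem.List.slice cs (some m) none with hcs'
      have hdrop : cs' = cs.drop m.toNat := PySem.List.slice_from _ (le_of_lt hm)
      have hlen' : (cs'.length : Int) = (cs.length : Int) - m := by
        rw [hdrop, List.length_drop]; omega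
      have hfuel : cs'.length ≤ f := by
        rw [hdrop, List.length_drop]; omega
      -- decompose the range
      have hr1 : PySem.List.pyRange 0 (cs.length : Int) m
          = 0 :: PySem.List.pyRange m (cs.length : Int) m := by
        rw [pyRange_pos_cons 0 _ m hm (by omega)]; norm_num
      have hr2 : PySem.List.pyRange m (cs.length : Int) m
          = (PySem.List.pyRange 0 (cs'.length : Int) m).map (· + m) := by
        rw [← pyRange_pos_shift _ m m hm, hlen']; ring_nf
      rw [hr1, hr2, List.map_cons, List.map_map]
      -- shifted chunks of cs are chunks of cs'
      have hmap : ((PySem.List.pyRange 0 (cs'.length : Int) m).map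
            ((fun i => PySem.List.slice cs (some i) (some (i + m))) ∘ (· + m)))
          = (PySem.List.pyRange 0 (cs'.length : Int) m).map
            (fun i => PySem.List.slice cs' (some i) (some (i + m))) := by
        apply List.map_congr_left
        intro i hi
        have h0i : 0 ≤ i := ((PySem.List.mem_pyRange_iff_of_pos hm i).mp hi).1
        simp only [Function.comp]
        rw [PySem.List.slice_toNat _ (by omega) (by omega),
            PySem.List.slice_toNat _ h0i (by omega), hdrop, List.drop_drop]
        have e1 : m.toNat + i.toNat = (i + m).toNat := by omega
        have e2 : (i + m + m).toNat - (i + m).toNat = (i + m).toNat - i.toNat := by omega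
        rw [e1, e2]
      rw [hmap]
      -- nonempty tail
      have hne : (PySem.List.pyRange 0 (cs'.length : Int) m).map
          (fun i => PySem.List.slice cs' (some i) (some (i + m))) ≠ [] := by
        rw [pyRange_pos_cons 0 _ m hm (by omega)]
        simp
      rw [join_cons_ne _ _ _ hne, ← ih cs' hfuel]
      congr 1
      congr 1
      simp [PySem.List.slice_zero_start]
    · rw [show goA (f+1) cs m = cs from by rw [goA]; rw [if_neg hlt]]
      rcases Nat.eq_zero_or_pos cs.length with h0 | hpos
      · have : cs = [] := List.length_eq_zero_iff.mp h0
        subst this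
        simp [PySem.List.pyRange_of_pos _ _ hm, PySem.Chars.join, List.intercalate]
      · have hr1 : PySem.List.pyRange 0 (cs.length : Int) m
            = 0 :: PySem.List.pyRange m (cs.length : Int) m := by
          rw [pyRange_pos_cons 0 _ m hm (by exact_mod_cast hpos)]; norm_num
        have hr2 : PySem.List.pyRange m (cs.length : Int) m = [] := by
          rw [PySem.List.pyRange_of_pos _ _ hm, if_neg hlt]; simp
        rw [hr1, hr2, List.map_cons, List.map_nil, PySem.Chars.join_singleton]
        have : PySem.List.slice cs (some 0) (some (0 + m)) = cs.take m.toNat := by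
          rw [PySem.List.slice_toNat _ le_rfl (by omega)]
          simp
        rw [this, List.take_of_length_le (by omega)]

-- ===== VERDICT =====
theorem add_line_break_spec : Claim_equal_add_line_break := by
  intro word m _ hpre
  unfold Spec_add_line_break add_line_break add_line_break_alt
  rw [goA_eq_chunks m hpre word.toList.length word.toList le_rfl]
  simp [PySem.Chars.len_eq]
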